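-- pv_equiv track=rewrite | github.com/YARKA333/PYstation14 | Components/OccluderComponent.py | linify
-- ===== SOURCE A (Python) =====
-- def get(grid,x,y):
--   if y<0 or y>=len(grid):return 0
--   if x<0 or x>=len(grid[0]):return 0
--   return grid[y][x]
--
-- def linify(grid):
--   lines=[[],[],[],[]]
--   for y in range(len(grid)+1):
--     lines[0].append([])
--     lines[2].append([])
--     for x in range(len(grid[0])):
--       a=get(grid,x,y-1)
--       b=get(grid,x,y)
--       if a: lines[0][-1].append(x)
--       if b: lines[2][-1].append(x)
--   for x in range(len(grid[0])+1):
--     lines[1].append([])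
--     lines[3].append([])
--     for y in range(len(grid)):
--       a=get(grid,x-1,y)
--       b=get(grid,x,y)
--       if a: lines[1][-1].append(y)
--       if b: lines[3][-1].append(y)
--   return lines
-- ===== SOURCE B (Python) =====
-- def linify(grid):
--     rows = len(grid)
--     cols = len(grid[0])
--     rowocc = [[x for x in range(cols) if grid[y][x]] for y in range(rows)]
--     colocc = [[y for y in range(rows) if grid[y][x]] for x in range(cols)]
--     return [[[]] + rowocc, [[]] + colocc, rowocc + [[]], colocc + [[]]]
-- ===== Notes on version B (the rewrite author's own statement) =====
-- stated objective: simpler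
-- what changed: Replaces the bounds-checked get helper and the two doubled boundary loops by one occupancy pass per axis (rowocc/colocc) and builds the four edge-line lists by prepending/appending an empty boundary cell.
import Mathlib
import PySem

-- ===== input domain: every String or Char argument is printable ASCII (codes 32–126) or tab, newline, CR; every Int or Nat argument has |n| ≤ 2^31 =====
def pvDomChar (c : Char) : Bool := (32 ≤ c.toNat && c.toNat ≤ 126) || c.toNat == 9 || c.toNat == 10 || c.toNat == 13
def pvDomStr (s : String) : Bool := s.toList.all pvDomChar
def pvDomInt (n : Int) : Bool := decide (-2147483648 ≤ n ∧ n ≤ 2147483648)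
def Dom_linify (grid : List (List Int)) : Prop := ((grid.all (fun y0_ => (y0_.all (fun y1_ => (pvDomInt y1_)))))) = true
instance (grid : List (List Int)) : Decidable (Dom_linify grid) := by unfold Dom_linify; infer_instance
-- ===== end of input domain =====

-- B builds row/column occupancy lists once and forms the four edge-line lists by shifting
-- them past an empty boundary cell, instead of A's bounds-checked get and doubled loops (objective: simpler).

-- ===== PORT A =====
-- get(grid, x, y): the bounds-checked cell access; the inner grid[y][x] is only reached with
-- 0 ≤ y < len(grid) and 0 ≤ x < len(grid[0]); under Pre_linify it never raises, so .getD 0 is exact there.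
def pvGetA (grid : List (List Int)) (x y : Int) : Int :=
  if y < 0 ∨ (grid.length : Int) ≤ y then 0
  else if x < 0 ∨ (((PySem.List.pyGet? grid 0).getD []).length : Int) ≤ x then 0
  else (PySem.List.pyGet? ((PySem.List.pyGet? grid y).getD []) x).getD 0

def linify (grid : List (List Int)) : List (List (List Int)) :=
  -- lines[0], lines[2] accumulated by the first y-loop; lines[1], lines[3] by the x-loop
  let l02 := (PySem.List.pyRange 0 ((grid.length : Int) + 1) 1).foldl
    (fun (acc : List (List Int) × List (List Int)) y =>
      let inner := (PySem.List.pyRange 0 ((((PySem.List.pyGet? grid 0).getD []).length : Int)) 1).foldl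
        (fun (p : List Int × List Int) x =>
          let a := pvGetA grid x (y - 1)
          let b := pvGetA grid x y
          (if a ≠ 0 then p.1 ++ [x] else p.1, if b ≠ 0 then p.2 ++ [x] else p.2))
        ([], [])
      (acc.1 ++ [inner.1], acc.2 ++ [inner.2]))
    ([], [])
  let l13 := (PySem.List.pyRange 0 ((((PySem.List.pyGet? grid 0).getD []).length : Int) + 1) 1).foldl
    (fun (acc : List (List Int) × List (List Int)) x =>
      let inner := (PySem.List.pyRange 0 (grid.length : Int) 1).foldl
        (fun (p : List Int × List Int) y =>
          let a := pvGetA grid (x - 1) y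
          let b := pvGetA grid x y
          (if a ≠ 0 then p.1 ++ [y] else p.1, if b ≠ 0 then p.2 ++ [y] else p.2))
        ([], [])
      (acc.1 ++ [inner.1], acc.2 ++ [inner.2]))
    ([], [])
  [l02.1, l13.1, l02.2, l13.2]

-- ===== PORT B =====
-- grid[y][x]: under Pre_linify always in range, so .getD 0 is exact there.
def pvCell (grid : List (List Int)) (y x : Int) : Int :=
  (PySem.List.pyGet? ((PySem.List.pyGet? grid y).getD []) x).getD 0

def linify_alt (grid : List (List Int)) : List (List (List Int)) :=
  let rows : Int := grid.length
  let cols : Int := ((PySem.List.pyGet? grid 0).getD []).length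
  let rowocc := (PySem.List.pyRange 0 rows 1).map
    (fun y => (PySem.List.pyRange 0 cols 1).filter (fun x => pvCell grid y x ≠ 0))
  let colocc := (PySem.List.pyRange 0 cols 1).map
    (fun x => (PySem.List.pyRange 0 rows 1).filter (fun y => pvCell grid y x ≠ 0))
  [[[]] ++ rowocc, [[]] ++ colocc, rowocc ++ [[]], colocc ++ [[]]]

-- ===== PRECONDITION & SPEC =====
-- Pre_ excludes exactly the inputs where Python A raises IndexError: the empty grid
-- (len(grid[0]) fails) and grids with some row shorter than the first row (grid[y][x] fails).
def Pre_linify (grid : List (List Int)) : Prop :=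
  grid ≠ [] ∧ ∀ r ∈ grid, (grid.headD []).length ≤ r.length
instance (grid : List (List Int)) : Decidable (Pre_linify grid) := by unfold Pre_linify; infer_instance
def pvWitness_linify : List (List Int) := [[1, 0], [0, 2], [1, 1]]

def Spec_linify (grid : List (List Int)) (out : List (List (List Int))) : Prop := out = linify_alt grid
instance (grid : List (List Int)) (out : List (List (List Int))) : Decidable (Spec_linify grid out) := by unfold Spec_linify; infer_instance

-- ===== CLAIM (what is proved, stated in full; the proofs are below) =====
def Claim_equal_linify : Prop := ∀ (grid : List (List Int)), Dom_linify grid → Pre_linify grid → Spec_linify grid (linify grid)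

-- ===== LEMMAS AND PROOFS =====

-- the inner per-cell fold is a pair of filters
theorem pv_inner_fold {c1 c2 : Int → Bool} (l : List Int) (a1 a2 : List Int) :
    l.foldl (fun (p : List Int × List Int) x =>
      (if c1 x then p.1 ++ [x] else p.1, if c2 x then p.2 ++ [x] else p.2)) (a1, a2)
      = (a1 ++ l.filter c1, a2 ++ l.filter c2) := by
  induction l generalizing a1 a2 with
  | nil => simp
  | cons h t ih =>
    simp only [List.foldl_cons, List.filter_cons]
    rw [ih]
    by_cases h1 : c1 h <;> by_cases h2 : c2 h <;> simp [h1, h2]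

-- the outer per-line fold is a pair of maps
theorem pv_outer_fold {α : Type} {g1 g2 : Int → α} (l : List Int) (a1 a2 : List α) :
    l.foldl (fun (acc : List α × List α) y => (acc.1 ++ [g1 y], acc.2 ++ [g2 y])) (a1, a2)
      = (a1 ++ l.map g1, a2 ++ l.map g2) := by
  induction l generalizing a1 a2 with
  | nil => simp
  | cons h t ih => simp [ih]

-- mapping a shifted-by-one function over range(n+1) = head at -1, then the unshifted map over range(n)
theorem pv_map_shift {α : Type} (h : Int → α) (n : Nat) :
    (PySem.List.pyRange 0 ((n : Int) + 1) 1).map (fun y => h (y - 1))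
      = h (-1) :: (PySem.List.pyRange 0 (n : Int) 1).map h := by
  induction n with
  | zero => norm_num [PySem.List.pyRange_one]
  | succ k ih =>
    have hc : ((k + 1 : Nat) : Int) + 1 = ((k : Int) + 1) + 1 := by push_cast; ring
    rw [hc, PySem.List.pyRange_one_succ_right (a := 0) (b := (k : Int) + 1) (by positivity),
        List.map_append, ih]
    push_cast
    rw [PySem.List.pyRange_one_succ_right (a := 0) (b := (k : Int)) (by positivity)]
    simp

-- and over range(n+1) without shift = map over range(n) plus last element
theorem pv_map_last {α : Type} (h : Int → α) (n : Nat) :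
    (PySem.List.pyRange 0 ((n : Int) + 1) 1).map h
      = (PySem.List.pyRange 0 (n : Int) 1).map h ++ [h (n : Int)] := by
  rw [PySem.List.pyRange_one_succ_right (a := 0) (b := (n : Int)) (by positivity)]
  simp

-- boundary rows/columns are empty: pvGetA is 0 out of range
theorem pv_getA_row_oob (grid : List (List Int)) (x y : Int)
    (hy : y < 0 ∨ (grid.length : Int) ≤ y) : pvGetA grid x y = 0 := by
  unfold pvGetA; rw [if_pos hy]

theorem pv_getA_col_oob (grid : List (List Int)) (x y : Int)
    (hx : x < 0 ∨ (((PySem.List.pyGet? grid 0).getD []).length : Int) ≤ x) :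
    pvGetA grid x y = 0 := by
  unfold pvGetA
  by_cases h : y < 0 ∨ (grid.length : Int) ≤ y
  · rw [if_pos h]
  · rw [if_neg h, if_pos hx]

-- in range, pvGetA is pvCell
theorem pv_getA_in (grid : List (List Int)) (x y : Int)
    (hy0 : 0 ≤ y) (hy1 : y < (grid.length : Int))
    (hx0 : 0 ≤ x) (hx1 : x < (((PySem.List.pyGet? grid 0).getD []).length : Int)) :
    pvGetA grid x y = pvCell grid y x := by
  unfold pvGetA pvCell
  rw [if_neg (by omega), if_neg (by omega)]

-- the row-occupancy line at a given y, as A's inner loop computes it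
theorem pv_rowline_eq (grid : List (List Int)) (y : Int)
    (hy0 : 0 ≤ y) (hy1 : y < (grid.length : Int)) :
    (PySem.List.pyRange 0 ((((PySem.List.pyGet? grid 0).getD []).length : Int)) 1).filter
        (fun x => pvGetA grid x y ≠ 0)
      = (PySem.List.pyRange 0 ((((PySem.List.pyGet? grid 0).getD []).length : Int)) 1).filter
        (fun x => pvCell grid y x ≠ 0) := by
  apply List.filter_congr
  intro x hx
  rw [PySem.List.mem_pyRange_one] at hx
  rw [pv_getA_in grid x y hy0 hy1 hx.1 hx.2]

theorem pv_rowline_oob (grid : List (List Int)) (y : Int)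
    (hy : y < 0 ∨ (grid.length : Int) ≤ y) :
    (PySem.List.pyRange 0 ((((PySem.List.pyGet? grid 0).getD []).length : Int)) 1).filter
        (fun x => pvGetA grid x y ≠ 0) = [] := by
  rw [List.filter_eq_nil_iff]
  intro x _
  simp [pv_getA_row_oob grid x y hy]

theorem pv_colline_eq (grid : List (List Int)) (x : Int)
    (hx0 : 0 ≤ x) (hx1 : x < (((PySem.List.pyGet? grid 0).getD []).length : Int)) :
    (PySem.List.pyRange 0 (grid.length : Int) 1).filter (fun y => pvGetA grid x y ≠ 0)
      = (PySem.List.pyRange 0 (grid.length : Int) 1).filter (fun y => pvCell grid y x ≠ 0) := by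
  apply List.filter_congr
  intro y hy
  rw [PySem.List.mem_pyRange_one] at hy
  rw [pv_getA_in grid x y hy.1 hy.2 hx0 hx1]

theorem pv_colline_oob (grid : List (List Int)) (x : Int)
    (hx : x < 0 ∨ (((PySem.List.pyGet? grid 0).getD []).length : Int) ≤ x) :
    (PySem.List.pyRange 0 (grid.length : Int) 1).filter (fun y => pvGetA grid x y ≠ 0) = [] := by
  rw [List.filter_eq_nil_iff]
  intro y _
  simp [pv_getA_col_oob grid x y hx]

-- ===== VERDICT (by name: the statement is the Claim_ definition above) =====
theorem linify_spec : Claim_equal_linify := by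
  intro grid _ _
  unfold Spec_linify linify linify_alt
  simp only []
  -- name the dimensions
  set R : Nat := grid.length with hR
  set C : Nat := ((PySem.List.pyGet? grid 0).getD []).length with hC
  -- A's folds as filters/maps
  have hinner02 : ∀ y : Int,
      (PySem.List.pyRange 0 (C : Int) 1).foldl
        (fun (p : List Int × List Int) x =>
          (if pvGetA grid x (y - 1) ≠ 0 then p.1 ++ [x] else p.1,
           if pvGetA grid x y ≠ 0 then p.2 ++ [x] else p.2)) ([], [])
        = ((PySem.List.pyRange 0 (C : Int) 1).filter (fun x => decide (pvGetA grid x (y - 1) ≠ 0)),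
           (PySem.List.pyRange 0 (C : Int) 1).filter (fun x => decide (pvGetA grid x y ≠ 0))) := by
    intro y
    have := pv_inner_fold (c1 := fun x => decide (pvGetA grid x (y - 1) ≠ 0))
      (c2 := fun x => decide (pvGetA grid x y ≠ 0))
      (PySem.List.pyRange 0 (C : Int) 1) [] []
    simpa using this
  have hinner13 : ∀ x : Int,
      (PySem.List.pyRange 0 (R : Int) 1).foldl
        (fun (p : List Int × List Int) y =>
          (if pvGetA grid (x - 1) y ≠ 0 then p.1 ++ [y] else p.1,
           if pvGetA grid x y ≠ 0 then p.2 ++ [y] else p.2)) ([], [])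
        = ((PySem.List.pyRange 0 (R : Int) 1).filter (fun y => decide (pvGetA grid (x - 1) y ≠ 0)),
           (PySem.List.pyRange 0 (R : Int) 1).filter (fun y => decide (pvGetA grid x y ≠ 0))) := by
    intro x
    have := pv_inner_fold (c1 := fun y => decide (pvGetA grid (x - 1) y ≠ 0))
      (c2 := fun y => decide (pvGetA grid x y ≠ 0))
      (PySem.List.pyRange 0 (R : Int) 1) [] []
    simpa using this
  simp only [hinner02, hinner13]
  rw [pv_outer_fold (g1 := fun y => (PySem.List.pyRange 0 (C : Int) 1).filter
        (fun x => decide (pvGetA grid x (y - 1) ≠ 0)))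
      (g2 := fun y => (PySem.List.pyRange 0 (C : Int) 1).filter
        (fun x => decide (pvGetA grid x y ≠ 0))),
     pv_outer_fold (g1 := fun x => (PySem.List.pyRange 0 (R : Int) 1).filter
        (fun y => decide (pvGetA grid (x - 1) y ≠ 0)))
      (g2 := fun x => (PySem.List.pyRange 0 (R : Int) 1).filter
        (fun y => decide (pvGetA grid x y ≠ 0)))]
  simp only [List.nil_append]
  -- the shift/append structure of each of the four lists
  rw [pv_map_shift (fun y => (PySem.List.pyRange 0 (C : Int) 1).filter
        (fun x => decide (pvGetA grid x y ≠ 0))) R,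
      pv_map_last (fun y => (PySem.List.pyRange 0 (C : Int) 1).filter
        (fun x => decide (pvGetA grid x y ≠ 0))) R,
      pv_map_shift (fun x => (PySem.List.pyRange 0 (R : Int) 1).filter
        (fun y => decide (pvGetA grid x y ≠ 0))) C,
      pv_map_last (fun x => (PySem.List.pyRange 0 (R : Int) 1).filter
        (fun y => decide (pvGetA grid x y ≠ 0))) C]
  rw [pv_rowline_oob grid (-1) (Or.inl (by norm_num)),
      pv_rowline_oob grid (R : Int) (Or.inr (by omega)),
      pv_colline_oob grid (-1) (Or.inl (by norm_num)),
      pv_colline_oob grid (C : Int) (Or.inr (by omega))]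
  -- in-range lines agree with B's pvCell-based filters
  have hrow : (PySem.List.pyRange 0 (R : Int) 1).map (fun y =>
        (PySem.List.pyRange 0 (C : Int) 1).filter (fun x => decide (pvGetA grid x y ≠ 0)))
      = (PySem.List.pyRange 0 (R : Int) 1).map (fun y =>
        (PySem.List.pyRange 0 (C : Int) 1).filter (fun x => decide (pvCell grid y x ≠ 0))) := by
    apply List.map_congr_left
    intro y hy
    rw [PySem.List.mem_pyRange_one] at hy
    exact pv_rowline_eq grid y hy.1 (by omega)
  have hcol : (PySem.List.pyRange 0 (C : Int) 1).map (fun x =>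
        (PySem.List.pyRange 0 (R : Int) 1).filter (fun y => decide (pvGetA grid x y ≠ 0)))
      = (PySem.List.pyRange 0 (C : Int) 1).map (fun x =>
        (PySem.List.pyRange 0 (R : Int) 1).filter (fun y => decide (pvCell grid y x ≠ 0))) := by
    apply List.map_congr_left
    intro x hx
    rw [PySem.List.mem_pyRange_one] at hx
    exact pv_colline_eq grid x hx.1 (by omega)
  rw [hrow, hcol]
  simp
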